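-- pv_equiv track=rewrite | github.com/ShapeLayer/training | tasks/online_judge/baekjoon/python/25633.py | compute
-- ===== SOURCE A (Python) =====
-- def compute(n: int, dominos: list[int]) -> int:
--     dp: list[tuple[int]] = [(1, dominos[i]) for i in range(n)]
--     for i in range(1, n):
--         domino = dominos[i]
--         for j in range(i):
--             now_count, _now_mass = dp[i]
--             prev_count, total_mass = dp[j]
--             if total_mass >= domino:
--                 if now_count <= prev_count + 1:
--                     dp[i] = (prev_count + 1, total_mass + domino)
--     result = -1
--     for each in dp:
--         if each[0] > result:
--             result = each[0]
--     return result
-- ===== SOURCE B (Python) =====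
-- def compute(n: int, dominos: list[int]) -> int:
--     # Pareto-pruned DP: keep only chain states (count, mass) not dominated by a
--     # later state, so each domino scans a (usually much) shorter candidate list.
--     front: list[tuple[int, int]] = []  # undominated (count, mass), creation order
--     ans = -1
--     for i in range(n):
--         d = dominos[i]
--         best = None
--         for c, m in front:
--             if m >= d and (best is None or c >= best[0]):
--                 best = (c, m)
--         new = (1, d) if best is None else (best[0] + 1, best[1] + d)
--         front = [e for e in front if e[0] > new[0] or e[1] > new[1]] + [new]
--         if new[0] > ans:
--             ans = new[0]
--     return ans
-- ===== Notes on version B (the rewrite author's own statement) =====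
-- stated objective: alternative
-- what changed: Replaces A's full quadratic scan over all previous chain states by a Pareto front: states dominated in both count and mass by a later state are pruned, so each domino scans and updates a candidate list that is typically much shorter (worst case still quadratic).
import Mathlib
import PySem

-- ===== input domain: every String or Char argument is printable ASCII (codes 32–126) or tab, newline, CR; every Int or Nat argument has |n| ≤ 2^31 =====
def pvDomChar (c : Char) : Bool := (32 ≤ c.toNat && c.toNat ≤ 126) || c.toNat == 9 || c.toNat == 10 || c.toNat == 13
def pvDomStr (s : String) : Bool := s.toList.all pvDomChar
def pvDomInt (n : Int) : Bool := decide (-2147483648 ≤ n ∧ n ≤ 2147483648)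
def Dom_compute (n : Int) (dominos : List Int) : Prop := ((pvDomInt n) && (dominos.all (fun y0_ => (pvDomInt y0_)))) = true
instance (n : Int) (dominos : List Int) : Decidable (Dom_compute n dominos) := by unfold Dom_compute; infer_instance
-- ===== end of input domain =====

-- B replaces A's full quadratic scan over all previous chain states by a Pareto front
-- (states dominated in count and mass by a later state are pruned); return values agree.

-- ===== PORT A =====
def compute (n : Int) (dominos : List Int) : Int :=
  -- dp = [(1, dominos[i]) for i in range(n)]
  let dp0 := (PySem.List.pyRange 0 n 1).map (fun i => ((1 : Int), PySem.List.pyGetD dominos i 0))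
  -- for i in range(1, n): for j in range(i): …  (dp[i] read/written via pyGetD/pySetD, in range under Pre_)
  let dp1 := (PySem.List.pyRange 1 n 1).foldl (fun dp i =>
    let domino := PySem.List.pyGetD dominos i 0
    (PySem.List.pyRange 0 i 1).foldl (fun dp j =>
      let now_count := (PySem.List.pyGetD dp i ((0 : Int), (0 : Int))).1
      let pj := PySem.List.pyGetD dp j ((0 : Int), (0 : Int))
      if pj.2 ≥ domino then
        if now_count ≤ pj.1 + 1 then
          PySem.List.pySetD dp i (pj.1 + 1, pj.2 + domino)
        else dp
      else dp) dp) dp0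
  dp1.foldl (fun result each => if each.1 > result then each.1 else result) (-1)

-- ===== PORT B =====
-- inner loop of Source B: best = None; for (c, m) in front: if m >= d and (best is None or c >= best[0]): best = (c, m)
def bestStep (d : Int) (best : Option (Int × Int)) (cm : Int × Int) : Option (Int × Int) :=
  match best with
  | none => if cm.2 ≥ d then some cm else none
  | some b => if cm.2 ≥ d ∧ cm.1 ≥ b.1 then some cm else some b

-- one iteration of Source B's main loop over (front, ans), for the domino d
def computeAltStep (st : List (Int × Int) × Int) (d : Int) : List (Int × Int) × Int :=
  let front := st.1
  let ans := st.2
  let best := front.foldl (bestStep d) none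
  let new := match best with
    | none => ((1 : Int), d)
    | some b => (b.1 + 1, b.2 + d)
  let front' := (front.filter (fun e => e.1 > new.1 || e.2 > new.2)) ++ [new]
  (front', if new.1 > ans then new.1 else ans)

-- for i in range(n): d = dominos[i]; …   (dominos[i] via pyGetD, in range under Pre_)
def compute_alt (n : Int) (dominos : List Int) : Int :=
  ((PySem.List.pyRange 0 n 1).foldl
    (fun st i => computeAltStep st (PySem.List.pyGetD dominos i 0)) ([], -1)).2

-- ===== PRECONDITION & SPEC =====
-- Pre_ excludes exactly the inputs on which A raises IndexError: n larger than len(dominos).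
def Pre_compute (n : Int) (dominos : List Int) : Prop := n ≤ (dominos.length : Int)
instance (n : Int) (dominos : List Int) : Decidable (Pre_compute n dominos) := by unfold Pre_compute; infer_instance

def pvWitness_compute : Int × List Int := (3, [4, 2, 6])

def Spec_compute (n : Int) (dominos : List Int) (out : Int) : Prop := out = compute_alt n dominos
instance (n : Int) (dominos : List Int) (out : Int) : Decidable (Spec_compute n dominos out) := by unfold Spec_compute; infer_instance

-- ===== CLAIM (what is proved, stated in full; the proofs are below) =====
def Claim_equal_compute : Prop := ∀ (n : Int) (dominos : List Int), Dom_compute n dominos → Pre_compute n dominos → Spec_compute n dominos (compute n dominos)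

-- ===== LEMMAS AND PROOFS =====

-- the common specification: the dp list A builds, expressed functionally
def specSel (d : Int) (S : List (Int × Int)) : Option (Int × Int) := S.foldl (bestStep d) none

def specNew (d : Int) (S : List (Int × Int)) : Int × Int :=
  match specSel d S with
  | none => (1, d)
  | some b => (b.1 + 1, b.2 + d)

def buildS (ds : List Int) : List (Int × Int) := ds.foldl (fun S d => S ++ [specNew d S]) []

def maxCount (S : List (Int × Int)) : Int := S.foldl (fun r e => if e.1 > r then e.1 else r) (-1)


-- ---- B side: pruning the front does not change the selection ----


theorem bestStep_none_pos (d : Int) (x : Int × Int) (h : x.2 ≥ d) : bestStep d none x = some x := by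
  simp only [bestStep]; rw [if_pos h]

theorem bestStep_none_neg (d : Int) (x : Int × Int) (h : ¬ x.2 ≥ d) : bestStep d none x = none := by
  simp only [bestStep]; rw [if_neg h]

theorem bestStep_some_pos (d : Int) (x b : Int × Int) (h : x.2 ≥ d ∧ x.1 ≥ b.1) :
    bestStep d (some b) x = some x := by
  simp only [bestStep]; rw [if_pos h]

theorem bestStep_some_neg (d : Int) (x b : Int × Int) (h : ¬ (x.2 ≥ d ∧ x.1 ≥ b.1)) :
    bestStep d (some b) x = some b := by
  simp only [bestStep]; rw [if_neg h]

theorem maxCount_append (S : List (Int × Int)) (x : Int × Int) :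
    maxCount (S ++ [x]) = if x.1 > maxCount S then x.1 else maxCount S := by
  simp [maxCount, List.foldl_append]

-- relation between a selection fold that saw a dominated element e and one that skipped it
def selR (d : Int) (e : Int × Int) (b1 b2 : Option (Int × Int)) : Prop :=
  b1 = b2 ∨ (b1 = some e ∧ e.2 ≥ d ∧ ∀ b, b2 = some b → b.1 ≤ e.1)

theorem selR_init (d : Int) (e : Int × Int) (b : Option (Int × Int)) :
    selR d e (bestStep d b e) b := by
  cases b with
  | none =>
    by_cases h : e.2 ≥ d
    · right; exact ⟨bestStep_none_pos d e h, h, by simp⟩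
    · left; exact bestStep_none_neg d e h
  | some b0 =>
    by_cases h : e.2 ≥ d ∧ e.1 ≥ b0.1
    · right
      refine ⟨bestStep_some_pos d e b0 h, h.1, ?_⟩
      intro b hb; cases hb; exact h.2
    · left; exact bestStep_some_neg d e b0 h

theorem selR_step (d : Int) (e x : Int × Int) (b1 b2 : Option (Int × Int))
    (h : selR d e b1 b2) : selR d e (bestStep d b1 x) (bestStep d b2 x) := by
  rcases h with h | ⟨h1, hd, h2⟩
  · subst h; left; rfl
  · subst h1
    by_cases hxd : x.2 ≥ d
    · by_cases hxe : x.1 ≥ e.1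
      · left
        rw [bestStep_some_pos d x e ⟨hxd, hxe⟩]
        cases b2 with
        | none => rw [bestStep_none_pos d x hxd]
        | some b => rw [bestStep_some_pos d x b ⟨hxd, by have := h2 b rfl; omega⟩]
      · right
        refine ⟨bestStep_some_neg d x e (by omega), hd, ?_⟩
        cases b2 with
        | none =>
          intro b hb
          rw [bestStep_none_pos d x hxd] at hb
          cases hb; omega
        | some b0 =>
          intro b hb
          have hb0 := h2 b0 rfl
          by_cases hc : x.2 ≥ d ∧ x.1 ≥ b0.1
          · rw [bestStep_some_pos d x b0 hc] at hb; cases hb; omega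
          · rw [bestStep_some_neg d x b0 hc] at hb; cases hb; exact hb0
    · right
      refine ⟨bestStep_some_neg d x e (by omega), hd, ?_⟩
      cases b2 with
      | none => intro b hb; rw [bestStep_none_neg d x hxd] at hb; cases hb
      | some b0 =>
        intro b hb
        rw [bestStep_some_neg d x b0 (by omega)] at hb
        cases hb; exact h2 b0 rfl

theorem selR_foldl (d : Int) (e : Int × Int) (l : List (Int × Int)) :
    ∀ (b1 b2 : Option (Int × Int)), selR d e b1 b2 →
      selR d e (l.foldl (bestStep d) b1) (l.foldl (bestStep d) b2) := by
  induction l with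
  | nil => intro b1 b2 h; exact h
  | cons x xs ih => intro b1 b2 h; exact ih _ _ (selR_step d e x b1 b2 h)

theorem selR_last (d : Int) (e new : Int × Int) (hc : e.1 ≤ new.1) (hm : e.2 ≤ new.2)
    (b1 b2 : Option (Int × Int)) (h : selR d e b1 b2) :
    bestStep d b1 new = bestStep d b2 new := by
  rcases h with h | ⟨h1, hd, h2⟩
  · subst h; rfl
  · subst h1
    have hnd : new.2 ≥ d := by omega
    rw [bestStep_some_pos d new e ⟨hnd, hc⟩]
    cases b2 with
    | none => rw [bestStep_none_pos d new hnd]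
    | some b0 => rw [bestStep_some_pos d new b0 ⟨hnd, by have := h2 b0 rfl; omega⟩]

-- folding a dominated element into the accumulator does not change the result,
-- provided the dominating element comes at the very end
theorem selR_collapse (d : Int) (e new : Int × Int) (l : List (Int × Int))
    (b : Option (Int × Int)) (hc : e.1 ≤ new.1) (hm : e.2 ≤ new.2) :
    (l ++ [new]).foldl (bestStep d) (bestStep d b e) = (l ++ [new]).foldl (bestStep d) b := by
  rw [List.foldl_append, List.foldl_append]
  exact selR_last d e new hc hm _ _ (selR_foldl d e l _ _ (selR_init d e b))

theorem prune_sel (d : Int) (new : Int × Int) (l : List (Int × Int)) :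
    ∀ (b : Option (Int × Int)),
      (l.filter (fun e => e.1 > new.1 || e.2 > new.2) ++ [new]).foldl (bestStep d) b
        = (l ++ [new]).foldl (bestStep d) b := by
  induction l with
  | nil => intro b; rfl
  | cons x xs ih =>
    intro b
    by_cases hp : (decide (x.1 > new.1) || decide (x.2 > new.2)) = true
    · rw [List.filter_cons, if_pos hp]
      simp only [List.cons_append, List.foldl_cons]
      exact ih _
    · have hdom : x.1 ≤ new.1 ∧ x.2 ≤ new.2 := by
        simp only [Bool.or_eq_true, decide_eq_true_eq] at hp; omega
      rw [List.filter_cons, if_neg hp]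
      simp only [List.cons_append, List.foldl_cons]
      rw [ih b]
      exact (selR_collapse d x new xs b hdom.1 hdom.2).symm

-- ---- B side: the main loop invariant ----

theorem alt_fold (ds : List Int) :
    ∀ (front : List (Int × Int)) (ans : Int) (S : List (Int × Int)),
      (∀ d, front.foldl (bestStep d) none = specSel d S) →
      ans = maxCount S →
      (ds.foldl computeAltStep (front, ans)).2
        = maxCount (ds.foldl (fun S d => S ++ [specNew d S]) S) := by
  induction ds with
  | nil => intro front ans S hf ha; exact ha
  | cons d rest ih =>
    intro front ans S hf ha
    simp only [List.foldl_cons]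
    have hstep : computeAltStep (front, ans) d
        = ((front.filter (fun e => e.1 > (specNew d S).1 || e.2 > (specNew d S).2)) ++ [specNew d S],
           if (specNew d S).1 > ans then (specNew d S).1 else ans) := by
      simp only [computeAltStep, hf d]
      rfl
    rw [hstep]
    apply ih
    · intro d'
      rw [prune_sel d' (specNew d S) front]
      simp only [specSel, List.foldl_append, List.foldl_cons, List.foldl_nil]
      rw [show front.foldl (bestStep d') none = specSel d' S from hf d']
      rfl
    · rw [maxCount_append, ha]

theorem compute_alt_eq_spec (n : Int) (dominos : List Int) (h : n ≤ (dominos.length : Int)) :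
    compute_alt n dominos = maxCount (buildS (dominos.take n.toNat)) := by
  unfold compute_alt
  by_cases hn : n ≤ 0
  · rw [PySem.List.pyRange_one_eq_nil hn, show n.toNat = 0 by omega]
    rfl
  · have htlen : (dominos.take n.toNat).length = n.toNat := by simp; omega
    have hrw : (PySem.List.pyRange 0 n 1).foldl
        (fun st i => computeAltStep st (PySem.List.pyGetD dominos i 0)) ([], -1)
        = (PySem.List.pyRange 0 (((dominos.take n.toNat).length : Nat) : Int) 1).foldl
            (fun st i => computeAltStep st (PySem.List.pyGetD (dominos.take n.toNat) i 0))
            ([], -1) := by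
      rw [show (((dominos.take n.toNat).length : Nat) : Int) = n by rw [htlen]; omega]
      apply PySem.List.foldl_congr_mem
      intro a i hi
      rcases PySem.List.mem_pyRange_one.1 hi with ⟨h0, h1⟩
      have hilen : i.toNat < dominos.length := by omega
      have hitake : i.toNat < (dominos.take n.toNat).length := by omega
      rw [show i = ((i.toNat : Nat) : Int) by omega,
          PySem.List.pyGetD_natCast, PySem.List.pyGetD_natCast,
          List.getD_eq_getElem dominos 0 hilen,
          List.getD_eq_getElem _ 0 hitake]
      simp [List.getElem_take]
    rw [hrw, PySem.List.foldl_pyRange_zero_pyGetD' (dominos.take n.toNat) 0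
          (fun st d => computeAltStep st d) ([], -1)]
    exact alt_fold (dominos.take n.toNat) [] (-1) [] (fun d => rfl) rfl

-- ---- A side: the imperative dp loop computes the same spec ----

def opt2 (d : Int) (b : Option (Int × Int)) : Int × Int :=
  match b with
  | none => (1, d)
  | some bb => (bb.1 + 1, bb.2 + d)

theorem specNew_eq_opt2 (d : Int) (S : List (Int × Int)) : specNew d S = opt2 d (specSel d S) := rfl

-- A's inner update fold, read off positions, equals the best-candidate selection
theorem entryA_fold (d : Int) (S : List (Int × Int)) :
    ∀ b : Option (Int × Int), (∀ e ∈ S, 1 ≤ e.1) →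
      S.foldl (fun now e =>
          if e.2 ≥ d then if now.1 ≤ e.1 + 1 then (e.1 + 1, e.2 + d) else now else now)
        (opt2 d b)
      = opt2 d (S.foldl (bestStep d) b) := by
  induction S with
  | nil => intro b h; rfl
  | cons e rest ih =>
    intro b h
    have he : 1 ≤ e.1 := h e (by simp)
    simp only [List.foldl_cons]
    have hstep : (if e.2 ≥ d then
          if (opt2 d b).1 ≤ e.1 + 1 then (e.1 + 1, e.2 + d) else opt2 d b
        else opt2 d b) = opt2 d (bestStep d b e) := by
      cases b with
      | none =>
        by_cases hd : e.2 ≥ d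
        · rw [if_pos hd, if_pos (by simp [opt2]; omega), bestStep_none_pos d e hd]; rfl
        · rw [if_neg hd, bestStep_none_neg d e hd]
      | some bb =>
        by_cases hd : e.2 ≥ d
        · by_cases hcc : bb.1 ≤ e.1
          · rw [if_pos hd, if_pos (by simp [opt2]; omega), bestStep_some_pos d e bb ⟨hd, by omega⟩]
            rfl
          · rw [if_pos hd, if_neg (by simp [opt2]; omega), bestStep_some_neg d e bb (by omega)]
        · rw [if_neg hd, bestStep_some_neg d e bb (by omega)]
    rw [hstep]
    exact ih _ (fun x hx => h x (by simp [hx]))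

-- a successful selection picks an element of the list (or keeps the start)
theorem sel_mem (d : Int) (l : List (Int × Int)) :
    ∀ b0 b, l.foldl (bestStep d) b0 = some b → b0 = some b ∨ b ∈ l := by
  induction l with
  | nil => intro b0 b h; left; exact h
  | cons x xs ih =>
    intro b0 b h
    rcases ih (bestStep d b0 x) b h with h1 | h1
    · cases b0 with
      | none =>
        by_cases hd : x.2 ≥ d
        · rw [bestStep_none_pos d x hd] at h1; cases h1; right; simp
        · rw [bestStep_none_neg d x hd] at h1; cases h1
      | some bb =>
        by_cases hc : x.2 ≥ d ∧ x.1 ≥ bb.1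
        · rw [bestStep_some_pos d x bb hc] at h1; cases h1; right; simp
        · rw [bestStep_some_neg d x bb hc] at h1; left; exact h1
    · right; simp [h1]

theorem buildS_append_singleton (xs : List Int) (x : Int) :
    buildS (xs ++ [x]) = buildS xs ++ [specNew x (buildS xs)] := by
  simp [buildS, List.foldl_append]

theorem length_buildS (xs : List Int) : (buildS xs).length = xs.length := by
  induction xs using List.reverseRecOn with
  | nil => rfl
  | append_singleton xs x ih => rw [buildS_append_singleton]; simp [ih]

theorem buildS_count_pos (xs : List Int) : ∀ e ∈ buildS xs, 1 ≤ e.1 := by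
  induction xs using List.reverseRecOn with
  | nil => intro e he; cases he
  | append_singleton xs x ih =>
    rw [buildS_append_singleton]
    intro e he
    rcases List.mem_append.1 he with h | h
    · exact ih e h
    · have he' : e = specNew x (buildS xs) := by simpa using h
      subst he'
      rw [specNew_eq_opt2]
      cases hsel : specSel x (buildS xs) with
      | none => simp [opt2]
      | some b =>
        rcases sel_mem x (buildS xs) none b hsel with h1 | h1
        · cases h1
        · have := ih b h1; simp [opt2]; omega

-- the initial dp list
theorem dp0_eq (n : Int) (dominos : List Int) (_h0 : 0 ≤ n) (h : n ≤ (dominos.length : Int)) :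
    (PySem.List.pyRange 0 n 1).map (fun i => ((1 : Int), PySem.List.pyGetD dominos i 0))
      = (dominos.take n.toNat).map (fun d => ((1 : Int), d)) := by
  apply List.ext_getElem
  · simp [PySem.List.length_pyRange_one]; omega
  · intro k h1 h2
    simp only [List.getElem_map]
    have hk : k < (PySem.List.pyRange 0 n 1).length := by simpa using h1
    rw [PySem.List.getElem_pyRange_one 0 n k hk]
    have hkn : k < n.toNat := by simpa [PySem.List.length_pyRange_one] using hk
    have hklen : k < dominos.length := by omega
    rw [show (0 : Int) + (k : Int) = ((k : Nat) : Int) by omega]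
    rw [PySem.List.pyGetD_natCast dominos k 0]
    rw [List.getD_eq_getElem dominos 0 hklen]
    simp [List.getElem_take]

-- reading an index below the length of the first part of an append
theorem pyGetD_append_left (Si rest : List (Int × Int)) (j : Int)
    (_h0 : 0 ≤ j) (h1 : j < (Si.length : Int)) :
    PySem.List.pyGetD (Si ++ rest) j ((0:Int),(0:Int)) = PySem.List.pyGetD Si j ((0:Int),(0:Int)) := by
  rw [PySem.List.pyGetD_eq_getElem (Si ++ rest) _ _h0 (by simp; omega),
      PySem.List.pyGetD_eq_getElem Si _ _h0 (by simpa using h1)]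
  exact List.getElem_append_left (by omega)

-- a fold over range(0, len(Si)) reading dp0 = Si ++ rest equals a fold over Si
theorem range_fold_prefix (Si rest : List (Int × Int)) (f : (Int × Int) → (Int × Int) → (Int × Int))
    (acc : Int × Int) :
    (PySem.List.pyRange 0 ((Si.length : Nat) : Int) 1).foldl
        (fun now j => f now (PySem.List.pyGetD (Si ++ rest) j ((0:Int),(0:Int)))) acc
      = Si.foldl f acc := by
  rw [PySem.List.foldl_congr_mem _ _
      (fun now j => f now (PySem.List.pyGetD Si j ((0:Int),(0:Int)))) acc
      (fun a x hx => by
        rcases PySem.List.mem_pyRange_one.1 hx with ⟨hx0, hx1⟩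
        rw [pyGetD_append_left Si rest x hx0 hx1])]
  exact PySem.List.foldl_pyRange_zero_pyGetD' Si ((0:Int),(0:Int)) f acc

-- the inner j-loop only writes position i; it equals a scalar fold plus one write
theorem inner_loop (d : Int) (iN : Nat) (dp0 : List (Int × Int)) (hi : iN < dp0.length) :
    ∀ (js : List Int) (acc : Int × Int), (∀ j ∈ js, 0 ≤ j ∧ j < (iN : Int)) →
      js.foldl (fun dp j =>
          if (PySem.List.pyGetD dp j ((0:Int),(0:Int))).2 ≥ d then
            if (PySem.List.pyGetD dp ((iN : Nat) : Int) ((0:Int),(0:Int))).1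
                ≤ (PySem.List.pyGetD dp j ((0:Int),(0:Int))).1 + 1 then
              PySem.List.pySetD dp ((iN : Nat) : Int)
                ((PySem.List.pyGetD dp j ((0:Int),(0:Int))).1 + 1,
                  (PySem.List.pyGetD dp j ((0:Int),(0:Int))).2 + d)
            else dp
          else dp)
        (PySem.List.pySetD dp0 ((iN : Nat) : Int) acc)
      = PySem.List.pySetD dp0 ((iN : Nat) : Int)
          (js.foldl (fun now j =>
              if (PySem.List.pyGetD dp0 j ((0:Int),(0:Int))).2 ≥ d then
                if now.1 ≤ (PySem.List.pyGetD dp0 j ((0:Int),(0:Int))).1 + 1 then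
                  ((PySem.List.pyGetD dp0 j ((0:Int),(0:Int))).1 + 1,
                    (PySem.List.pyGetD dp0 j ((0:Int),(0:Int))).2 + d)
                else now
              else now) acc) := by
  intro js
  induction js with
  | nil => intro acc h; rfl
  | cons j rest ih =>
    intro acc h
    have hj := h j (by simp)
    have hset : ∀ v : Int × Int,
        PySem.List.pySetD (PySem.List.pySetD dp0 ((iN : Nat) : Int) acc) ((iN : Nat) : Int) v
          = PySem.List.pySetD dp0 ((iN : Nat) : Int) v := by
      intro v
      rw [PySem.List.pySetD_natCast, PySem.List.pySetD_natCast, PySem.List.pySetD_natCast,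
          List.set_set]
    have hread_i : PySem.List.pyGetD (PySem.List.pySetD dp0 ((iN : Nat) : Int) acc)
        ((iN : Nat) : Int) ((0:Int),(0:Int)) = acc := by
      rw [PySem.List.pyGetD_pySetD_natCast dp0 iN iN acc _ hi]; simp
    have hread_j : PySem.List.pyGetD (PySem.List.pySetD dp0 ((iN : Nat) : Int) acc) j
        ((0:Int),(0:Int)) = PySem.List.pyGetD dp0 j ((0:Int),(0:Int)) := by
      rw [show j = ((j.toNat : Nat) : Int) by omega,
          PySem.List.pyGetD_pySetD_natCast dp0 iN j.toNat acc _ hi]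
      rw [if_neg (by omega)]
    simp only [List.foldl_cons, hread_i, hread_j]
    split_ifs with h1 h2
    · rw [hset]
      exact ih _ (fun x hx => h x (by simp [hx]))
    · exact ih _ (fun x hx => h x (by simp [hx]))
    · exact ih _ (fun x hx => h x (by simp [hx]))

-- zeta-reduced corollary of range_fold_prefix, in the exact shape the goal takes
theorem range_fold_prefix' (Si rest : List (Int × Int)) (d : Int) (acc : Int × Int) :
    (PySem.List.pyRange 0 ((Si.length : Nat) : Int) 1).foldl
        (fun now j =>
          if (PySem.List.pyGetD (Si ++ rest) j ((0:Int),(0:Int))).2 ≥ d then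
            if now.1 ≤ (PySem.List.pyGetD (Si ++ rest) j ((0:Int),(0:Int))).1 + 1 then
              ((PySem.List.pyGetD (Si ++ rest) j ((0:Int),(0:Int))).1 + 1,
                (PySem.List.pyGetD (Si ++ rest) j ((0:Int),(0:Int))).2 + d)
            else now
          else now) acc
      = Si.foldl (fun now e =>
          if e.2 ≥ d then if now.1 ≤ e.1 + 1 then (e.1 + 1, e.2 + d) else now else now) acc :=
  range_fold_prefix Si rest
    (fun now e => if e.2 ≥ d then if now.1 ≤ e.1 + 1 then (e.1 + 1, e.2 + d) else now else now) acc

-- A's inner fold, written as entry selection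
theorem entryA_spec (d : Int) (S : List (Int × Int)) (h : ∀ e ∈ S, 1 ≤ e.1) :
    S.foldl (fun now e =>
        if e.2 ≥ d then if now.1 ≤ e.1 + 1 then (e.1 + 1, e.2 + d) else now else now)
      ((1 : Int), d) = specNew d S := by
  rw [specNew_eq_opt2]
  exact entryA_fold d S none h

-- the outer i-loop: after processing i = 1 .. m+1 the first m+2 entries are final
theorem outer_loop (n : Int) (dominos : List Int) (h2 : n ≤ (dominos.length : Int)) :
    ∀ (m : Nat), (m : Int) + 1 ≤ n →
      (PySem.List.pyRange 1 ((m : Int) + 1) 1).foldl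
        (fun dp i =>
          (PySem.List.pyRange 0 i 1).foldl
            (fun dp j =>
              if (PySem.List.pyGetD dp j ((0:Int),(0:Int))).2 ≥ PySem.List.pyGetD dominos i 0 then
                if (PySem.List.pyGetD dp i ((0:Int),(0:Int))).1
                    ≤ (PySem.List.pyGetD dp j ((0:Int),(0:Int))).1 + 1 then
                  PySem.List.pySetD dp i
                    ((PySem.List.pyGetD dp j ((0:Int),(0:Int))).1 + 1,
                      (PySem.List.pyGetD dp j ((0:Int),(0:Int))).2 + PySem.List.pyGetD dominos i 0)
                else dp
              else dp)
            dp)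
        ((dominos.take n.toNat).map (fun d => ((1 : Int), d)))
      = buildS ((dominos.take n.toNat).take (m + 1))
          ++ ((dominos.take n.toNat).drop (m + 1)).map (fun d => ((1 : Int), d)) := by
  intro m
  induction m with
  | zero =>
    intro hm
    rw [PySem.List.pyRange_one_eq_nil (by simp : ((0:Nat):Int) + 1 ≤ 1)]
    rw [List.foldl_nil]
    rcases ht : dominos.take n.toNat with _ | ⟨a, t'⟩
    · have hlen : (dominos.take n.toNat).length = n.toNat := by simp; omega
      rw [ht] at hlen; simp at hlen; omega
    · simp [buildS, specNew, specSel]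
  | succ m ih =>
    intro hm
    have hmn : (m : Int) + 1 ≤ n := by push_cast at hm ⊢; omega
    rw [show (((m + 1 : Nat)) : Int) + 1 = ((m : Int) + 1) + 1 by push_cast; ring]
    rw [PySem.List.pyRange_one_succ_right (by omega : (1:Int) ≤ (m : Int) + 1)]
    rw [List.foldl_append, ih hmn]
    simp only [List.foldl_cons, List.foldl_nil]
    -- abbreviations
    have htlen : (dominos.take n.toNat).length = n.toNat := by simp; omega
    have hiN : m + 1 < (dominos.take n.toNat).length := by rw [htlen]; omega
    have hSilen : (buildS ((dominos.take n.toNat).take (m + 1))).length = m + 1 := by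
      rw [length_buildS, List.length_take]; omega
    have hreslen : (buildS ((dominos.take n.toNat).take (m + 1))
        ++ ((dominos.take n.toNat).drop (m + 1)).map (fun d => ((1 : Int), d))).length
        = (dominos.take n.toNat).length := by
      simp [hSilen, htlen]; omega
    have hlen2 : m + 1 < (buildS ((dominos.take n.toNat).take (m + 1))
        ++ ((dominos.take n.toNat).drop (m + 1)).map (fun d => ((1 : Int), d))).length := by
      rw [hreslen]; exact hiN
    -- the i-index as a Nat cast
    rw [show (m : Int) + 1 = (((m + 1 : Nat)) : Int) by push_cast; ring]
    -- the domino read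
    have hdom : PySem.List.pyGetD dominos (((m + 1 : Nat)) : Int) 0
        = (dominos.take n.toNat)[m + 1] := by
      rw [PySem.List.pyGetD_natCast dominos (m + 1) 0,
          List.getD_eq_getElem dominos 0 (by omega : m + 1 < dominos.length)]
      rw [List.getElem_take]
    rw [hdom]
    -- the current entry read
    have hacc : PySem.List.pyGetD (buildS ((dominos.take n.toNat).take (m + 1))
        ++ ((dominos.take n.toNat).drop (m + 1)).map (fun d => ((1 : Int), d)))
        (((m + 1 : Nat)) : Int) ((0:Int),(0:Int)) = ((1 : Int), (dominos.take n.toNat)[m + 1]) := by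
      rw [PySem.List.pyGetD_natCast, List.getD_eq_getElem _ _ hlen2]
      rw [List.getElem_append_right (by omega)]
      simp [hSilen, List.getElem_drop]
    -- rewrite the start of the inner loop as a write of its own value
    have hself : PySem.List.pySetD (buildS ((dominos.take n.toNat).take (m + 1))
        ++ ((dominos.take n.toNat).drop (m + 1)).map (fun d => ((1 : Int), d)))
        (((m + 1 : Nat)) : Int)
        (PySem.List.pyGetD (buildS ((dominos.take n.toNat).take (m + 1))
          ++ ((dominos.take n.toNat).drop (m + 1)).map (fun d => ((1 : Int), d)))
          (((m + 1 : Nat)) : Int) ((0:Int),(0:Int)))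
        = buildS ((dominos.take n.toNat).take (m + 1))
            ++ ((dominos.take n.toNat).drop (m + 1)).map (fun d => ((1 : Int), d)) := by
      rw [PySem.List.pySetD_natCast, PySem.List.pyGetD_natCast,
          List.getD_eq_getElem _ _ hlen2, List.set_getElem_self]
    have hinner := inner_loop ((dominos.take n.toNat)[m + 1]) (m + 1)
      (buildS ((dominos.take n.toNat).take (m + 1))
        ++ ((dominos.take n.toNat).drop (m + 1)).map (fun d => ((1 : Int), d))) hlen2
      (PySem.List.pyRange 0 (((m + 1 : Nat)) : Int) 1)
      (PySem.List.pyGetD (buildS ((dominos.take n.toNat).take (m + 1))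
        ++ ((dominos.take n.toNat).drop (m + 1)).map (fun d => ((1 : Int), d)))
        (((m + 1 : Nat)) : Int) ((0:Int),(0:Int)))
      (fun j hj => by rcases PySem.List.mem_pyRange_one.1 hj with ⟨h1, h3⟩; exact ⟨h1, h3⟩)
    rw [hself] at hinner
    rw [hinner, hacc]
    rw [show (((m + 1 : Nat)) : Int)
        = (((buildS ((dominos.take n.toNat).take (m + 1))).length : Nat) : Int) by rw [hSilen]]
    rw [range_fold_prefix']
    rw [entryA_spec _ _ (buildS_count_pos _)]
    -- the final write extends the finished prefix by one entry
    rw [PySem.List.pySetD_natCast, List.set_append]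
    rw [if_neg (by omega)]
    rw [Nat.sub_self]
    rw [List.drop_eq_getElem_cons hiN, List.map_cons, List.set_cons_zero]
    have hts : List.take (m + 1 + 1) (List.take n.toNat dominos)
        = List.take (m + 1) (List.take n.toNat dominos) ++ [(List.take n.toNat dominos)[m + 1]] := by
      rw [List.take_add_one, List.getElem?_eq_getElem hiN]; rfl
    rw [hts, buildS_append_singleton]
    simp

theorem compute_eq_spec (n : Int) (dominos : List Int) (h : n ≤ (dominos.length : Int)) :
    compute n dominos = maxCount (buildS (dominos.take n.toNat)) := by
  by_cases hn : n ≤ 0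
  · simp only [compute]
    rw [PySem.List.pyRange_one_eq_nil (hn : n ≤ 0), PySem.List.pyRange_one_eq_nil (by omega : n ≤ 1)]
    rw [show n.toNat = 0 by omega]
    rfl
  · obtain ⟨m, rfl⟩ : ∃ m : Nat, n = (m : Int) + 1 := ⟨(n - 1).toNat, by omega⟩
    simp only [compute]
    rw [dp0_eq ((m : Int) + 1) dominos (by omega) h]
    rw [outer_loop ((m : Int) + 1) dominos h m (by omega)]
    have htlen : (dominos.take ((m : Int) + 1).toNat).length = m + 1 := by simp; omega
    rw [List.take_of_length_le (by omega), List.drop_eq_nil_of_le (by omega), List.map_nil,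
        List.append_nil]
    rfl

-- ===== VERDICT (by name: the statement is the Claim_ definition above) =====
theorem compute_spec : Claim_equal_compute := by
  intro n dominos _ hpre
  unfold Spec_compute
  rw [compute_eq_spec n dominos hpre, compute_alt_eq_spec n dominos hpre]
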